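-- pv_equiv track=rewrite | github.com/Ricardo4Yin/labeleva | src/labelrag/io/serialize.py | _rebuild_paragraph_ids_by_concept
-- ===== SOURCE A (Python) =====
-- def _rebuild_paragraph_ids_by_concept(
--     concept_ids_by_paragraph: dict[str, list[str]],
-- ) -> dict[str, list[str]]:
--     """Rebuild concept reverse lookups from paragraph-side concept assignments."""
--
--     paragraph_ids_by_concept: dict[str, list[str]] = {}
--     for paragraph_id, concept_ids in concept_ids_by_paragraph.items():
--         for concept_id in concept_ids:
--             paragraph_ids_by_concept.setdefault(concept_id, []).append(paragraph_id)
--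
--     for concept_id in paragraph_ids_by_concept:
--         paragraph_ids_by_concept[concept_id].sort()
--     return paragraph_ids_by_concept
-- ===== SOURCE B (Python) =====
-- def _rebuild_paragraph_ids_by_concept(
--     concept_ids_by_paragraph: dict[str, list[str]],
-- ) -> dict[str, list[str]]:
--     """Flatten to (concept, paragraph) pairs, sort them once by paragraph id, then
--     group with a single appending pass: every bucket comes out already sorted."""
--     pairs = [
--         (concept_id, paragraph_id)
--         for paragraph_id, concept_ids in concept_ids_by_paragraph.items()
--         for concept_id in concept_ids
--     ]
--     buckets: dict[str, list[str]] = {concept_id: [] for concept_id, _ in pairs}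
--     for concept_id, paragraph_id in sorted(pairs, key=lambda cp: cp[1]):
--         buckets[concept_id].append(paragraph_id)
--     return buckets
-- ===== Notes on version B (the rewrite author's own statement) =====
-- stated objective: alternative
-- what changed: B replaces A's mutate-a-dict-as-you-go grouping (setdefault/append, then a second pass sorting every bucket in place) by flattening the input into (concept, paragraph) pairs, sorting that pair list once by paragraph id, and grouping with a single appending pass, so each bucket comes out already sorted.
import Mathlib
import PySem

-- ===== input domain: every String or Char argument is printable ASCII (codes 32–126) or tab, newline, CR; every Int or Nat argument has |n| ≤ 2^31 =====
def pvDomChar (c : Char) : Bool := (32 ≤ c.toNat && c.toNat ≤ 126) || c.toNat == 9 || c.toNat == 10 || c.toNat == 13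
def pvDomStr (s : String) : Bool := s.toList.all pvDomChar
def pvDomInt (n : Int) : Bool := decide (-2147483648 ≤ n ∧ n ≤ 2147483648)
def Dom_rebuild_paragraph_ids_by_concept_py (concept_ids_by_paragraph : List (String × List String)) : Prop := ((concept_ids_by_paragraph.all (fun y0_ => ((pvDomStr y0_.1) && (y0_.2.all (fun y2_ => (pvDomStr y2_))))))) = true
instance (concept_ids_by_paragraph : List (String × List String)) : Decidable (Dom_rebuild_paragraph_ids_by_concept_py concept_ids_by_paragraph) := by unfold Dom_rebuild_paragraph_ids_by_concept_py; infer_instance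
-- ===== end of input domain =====

-- B replaces the mutate-a-dict-then-sort-each-bucket loop by flattening to (concept, paragraph)
-- pairs, sorting them once by paragraph id, and grouping with one appending pass, so every bucket
-- is already sorted (objective: alternative decomposition).

-- ===== PORT A =====
-- setdefault(c, []).append(p) is exactly Dict.modify c [] (· ++ [p]) (create-if-missing, append at the value).
def rebuild_paragraph_ids_by_concept_py (concept_ids_by_paragraph : List (String × List String)) : List (String × List String) :=
  let d : PySem.Dict String (List String) :=
    concept_ids_by_paragraph.foldl
      (fun acc pc =>
        pc.2.foldl (fun acc c => acc.modify c [] (· ++ [pc.1])) acc)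
      PySem.Dict.empty
  -- 'for concept_id in d: d[concept_id].sort()' — in-place sort of each bucket, iterating the keys
  let d2 := d.keys.foldl (fun dd c => dd.modify c [] (fun xs => PySem.List.sorted xs (fun x => x))) d
  d2.items

-- ===== PORT B =====
def rebuild_paragraph_ids_by_concept_py_alt (concept_ids_by_paragraph : List (String × List String)) : List (String × List String) :=
  let pairs : List (String × String) :=
    concept_ids_by_paragraph.flatMap (fun pc => pc.2.map (fun c => (c, pc.1)))
  -- {c: [] for c, _ in pairs}: duplicate keys overwrite in place with the same []; order = first appearance
  let buckets : PySem.Dict String (List String) :=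
    pairs.foldl (fun acc cp => acc.insert cp.1 ([] : List String)) PySem.Dict.empty
  -- buckets[c].append(p): c is always a present key of buckets, so the in-place append is Dict.modify c [] (· ++ [p])
  let buckets2 :=
    (PySem.List.sorted pairs (fun cp => cp.2)).foldl
      (fun acc cp => acc.modify cp.1 [] (· ++ [cp.2])) buckets
  buckets2.items

-- ===== PRECONDITION & SPEC =====
def Spec_rebuild_paragraph_ids_by_concept_py (concept_ids_by_paragraph : List (String × List String)) (out : List (String × List String)) : Prop := out = rebuild_paragraph_ids_by_concept_py_alt concept_ids_by_paragraph
instance (concept_ids_by_paragraph : List (String × List String)) (out : List (String × List String)) : Decidable (Spec_rebuild_paragraph_ids_by_concept_py concept_ids_by_paragraph out) := by unfold Spec_rebuild_paragraph_ids_by_concept_py; infer_instance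

-- ===== CLAIM (what is proved, stated in full; the proofs are below) =====
def Claim_equal_rebuild_paragraph_ids_by_concept_py : Prop := ∀ (concept_ids_by_paragraph : List (String × List String)), Dom_rebuild_paragraph_ids_by_concept_py concept_ids_by_paragraph → Spec_rebuild_paragraph_ids_by_concept_py concept_ids_by_paragraph (rebuild_paragraph_ids_by_concept_py concept_ids_by_paragraph)


-- ===== LEMMAS AND PROOFS =====

-- The sort loop of A, pointwise: folding `modify c [] sort` over a Nodup key list sorts exactly
-- the buckets of the listed keys and leaves every other lookup unchanged.
theorem pv_sortloop_getD (ks : List String) (d : PySem.Dict String (List String)) (k : String)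
    (hnd : ks.Nodup) :
    ((ks.foldl (fun dd c => dd.modify c [] (fun xs => PySem.List.sorted xs (fun x => x))) d).getD k [])
      = if k ∈ ks then PySem.List.sorted (d.getD k []) (fun x => x) else d.getD k [] := by
  induction ks generalizing d with
  | nil => simp
  | cons c ks ih =>
    simp only [List.foldl_cons]
    rcases List.nodup_cons.mp hnd with ⟨hc, hnd'⟩
    rw [ih _ hnd']
    by_cases hk : k ∈ ks
    · have : k ≠ c := fun h => hc (h ▸ hk)
      simp [hk, this, PySem.Dict.getD_modify]
    · by_cases hkc : k = c
      · subst hkc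
        simp [hk]
      · simp [hk, hkc, PySem.Dict.getD_modify]

-- B's key-registering comprehension, pointwise: every insert for a key inserts the same
-- key-determined value, so the lookup is that value for listed keys and the start dict's elsewhere.
theorem pv_insertV_getD (ps : List (String × String)) (V : String → List String)
    (acc : PySem.Dict String (List String)) (k : String) :
    ((ps.foldl (fun acc cp => acc.insert cp.1 (V cp.1)) acc).getD k [])
      = if k ∈ ps.map Prod.fst then V k else acc.getD k [] := by
  induction ps generalizing acc with
  | nil => simp
  | cons cp ps ih =>
    simp only [List.foldl_cons, List.map_cons, List.mem_cons]
    rw [ih]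
    by_cases hk : k ∈ ps.map Prod.fst
    · simp [hk]
    · by_cases hkc : k = cp.1
      · subst hkc
        simp [hk]
      · simp [hk, hkc, PySem.Dict.getD_insert]

-- Updating a set with elements it already holds changes nothing.
theorem pv_update_subset (s : PySem.Set String) (xs : List String) (h : ∀ x ∈ xs, x ∈ s) :
    PySem.Set.update s xs = s := by
  rw [PySem.Set.update_eq_append_filter]
  have : (PySem.Set.ofList xs).filter (fun y => !PySem.Set.contains s y) = [] := by
    rw [List.filter_eq_nil_iff]
    intro y hy
    have : y ∈ s := h y ((PySem.Set.mem_ofList _ _).mp hy)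
    simpa using this
  rw [this, List.append_nil]

-- Filtering one globally-by-paragraph-sorted pair list gives each bucket already sorted:
-- it equals sorting the bucket itself.
theorem pv_filter_sorted (pairs : List (String × String)) (k : String) :
    ((PySem.List.sorted pairs (fun cp => cp.2)).filter (fun q => q.1 == k)).map (·.2)
      = PySem.List.sorted ((pairs.filter (fun q => q.1 == k)).map (·.2)) (fun x => x) := by
  refine List.Perm.eq_of_pairwise (le := (· ≤ ·))
    (fun a b _ _ hab hba => le_antisymm hab hba)
    (List.pairwise_map.mpr ((PySem.List.sorted_pairwise pairs (fun cp => cp.2)).filter _))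
    (PySem.List.sorted_pairwise _ (fun x => x))
    (List.Perm.trans
      (((PySem.List.sorted_perm pairs (fun cp => cp.2) false).filter _).map _)
      (PySem.List.sorted_perm _ _ false).symm)

theorem rebuild_paragraph_ids_by_concept_py_spec : Claim_equal_rebuild_paragraph_ids_by_concept_py := by
  intro l _
  unfold Spec_rebuild_paragraph_ids_by_concept_py
  unfold rebuild_paragraph_ids_by_concept_py rebuild_paragraph_ids_by_concept_py_alt
  set pairs : List (String × String) := l.flatMap (fun pc => pc.2.map (fun c => (c, pc.1))) with hpairs
  -- A's nested accumulation loop is the flat loop over `pairs`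
  have hA : (l.foldl (fun acc pc => pc.2.foldl (fun acc c => acc.modify c [] (· ++ [pc.1])) acc)
        (PySem.Dict.empty : PySem.Dict String (List String)))
      = pairs.foldl (fun acc q => acc.modify q.1 [] (· ++ [q.2])) PySem.Dict.empty := by
    rw [hpairs, List.foldl_flatMap]
    simp only [List.foldl_map]
  rw [hA]
  set dA : PySem.Dict String (List String) :=
    pairs.foldl (fun acc q => acc.modify q.1 [] (· ++ [q.2])) PySem.Dict.empty with hdA
  set dB0 : PySem.Dict String (List String) :=
    pairs.foldl (fun acc cp => acc.insert cp.1 ([] : List String)) PySem.Dict.empty with hdB0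
  set dB : PySem.Dict String (List String) :=
    (PySem.List.sorted pairs (fun cp => cp.2)).foldl
      (fun acc cp => acc.modify cp.1 [] (· ++ [cp.2])) dB0 with hdB
  have hkeysA : dA.keys = PySem.Set.ofList (pairs.map Prod.fst) := by
    rw [hdA, PySem.Dict.keys_foldl_modify_key pairs Prod.fst [] (fun _ q => (· ++ [q.2]))]
    rw [PySem.Dict.keys_empty, PySem.Set.update_nil_left]
  have hndA : dA.keys.Nodup := by
    rw [hkeysA]; exact PySem.Set.nodup_ofList _
  have hkeysB0 : dB0.keys = PySem.Set.ofList (pairs.map Prod.fst) := by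
    rw [hdB0, PySem.Dict.keys_foldl_insert_key pairs Prod.fst (fun _ _ => ([] : List String))]
    rw [PySem.Dict.keys_empty, PySem.Set.update_nil_left]
  have hkeysB : dB.keys = PySem.Set.ofList (pairs.map Prod.fst) := by
    rw [hdB, PySem.Dict.keys_foldl_modify_key (PySem.List.sorted pairs (fun cp => cp.2)) Prod.fst []
      (fun _ cp => (· ++ [cp.2])), hkeysB0]
    apply pv_update_subset
    intro x hx
    rcases List.mem_map.mp hx with ⟨cp, hcp, rfl⟩
    have : cp ∈ pairs := (PySem.List.sorted_perm pairs (fun cp => cp.2) false).mem_iff.mp hcp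
    exact (PySem.Set.mem_ofList _ _).mpr (List.mem_map_of_mem this)
  have hndB : dB.keys.Nodup := by
    rw [hkeysB]; exact PySem.Set.nodup_ofList _
  set d2 : PySem.Dict String (List String) :=
    dA.keys.foldl (fun dd c => dd.modify c [] (fun xs => PySem.List.sorted xs (fun x => x))) dA with hd2
  have hkeys2 : d2.keys = dA.keys := by
    rw [hd2, PySem.Dict.keys_foldl_modify dA.keys []
      (fun _ _ => (fun xs => PySem.List.sorted xs (fun x => x)))]
    rw [hkeysA]
    exact pv_update_subset _ _ (fun x hx => hx)
  have hnd2 : d2.keys.Nodup := by rw [hkeys2]; exact hndA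
  rw [PySem.Dict.items_eq_map_keys d2 hnd2 [], PySem.Dict.items_eq_map_keys dB hndB [],
    hkeys2, hkeysB, hkeysA]
  apply List.map_congr_left
  intro k hk
  have hkmem : k ∈ pairs.map Prod.fst := (PySem.Set.mem_ofList _ _).mp hk
  have h2 : d2.getD k [] = PySem.List.sorted (dA.getD k []) (fun x => x) := by
    rw [hd2, pv_sortloop_getD dA.keys dA k hndA, hkeysA, if_pos hk]
  have hAval : dA.getD k [] = (pairs.filter (fun q => q.1 == k)).map (·.2) := by
    rw [hdA, PySem.Dict.getD_foldl_modify_append, PySem.Dict.getD_empty, List.nil_append]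
  have hB0val : dB0.getD k [] = [] := by
    rw [hdB0, pv_insertV_getD pairs (fun _ => [])]
    simp
  have hBval : dB.getD k []
      = PySem.List.sorted ((pairs.filter (fun q => q.1 == k)).map (·.2)) (fun x => x) := by
    rw [hdB, PySem.Dict.getD_foldl_modify_append, hB0val, List.nil_append, pv_filter_sorted]
  rw [h2, hAval, hBval]
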